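-- pv_equiv track=rewrite | github.com/leonelmd/ML_uERG_WT_5xFAD | chirp_analysis/src/17_amplitude_trace_inspection.py | _contiguous_windows
-- ===== SOURCE A (Python) =====
-- def _contiguous_windows(mask):
--     windows = []
--     in_win = False
--     for i, s in enumerate(mask):
--         if s and not in_win:
--             w_start = i; in_win = True
--         elif not s and in_win:
--             windows.append((w_start, i - 1)); in_win = False
--     if in_win:
--         windows.append((w_start, len(mask) - 1))
--     return windows
-- ===== SOURCE B (Python) =====
-- def _contiguous_windows(mask):
--     windows = []
--     idx = 0
--     n = len(mask)
--     while idx < n: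
--         j = idx
--         while j < n and bool(mask[j]) == bool(mask[idx]):
--             j += 1
--         if mask[idx]:
--             windows.append((idx, j - 1))
--         idx = j
--     return windows
-- ===== Notes on version B (the rewrite author's own statement) =====
-- stated objective: alternative
-- what changed: Replaced the in-window flag state machine by a run-based scanner: an outer loop jumps from run boundary to run boundary (inner scan counts the length of the current run of equal truth values) and emits (start, end) directly for each True run, with no boolean flag or deferred window start.
import Mathlib
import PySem

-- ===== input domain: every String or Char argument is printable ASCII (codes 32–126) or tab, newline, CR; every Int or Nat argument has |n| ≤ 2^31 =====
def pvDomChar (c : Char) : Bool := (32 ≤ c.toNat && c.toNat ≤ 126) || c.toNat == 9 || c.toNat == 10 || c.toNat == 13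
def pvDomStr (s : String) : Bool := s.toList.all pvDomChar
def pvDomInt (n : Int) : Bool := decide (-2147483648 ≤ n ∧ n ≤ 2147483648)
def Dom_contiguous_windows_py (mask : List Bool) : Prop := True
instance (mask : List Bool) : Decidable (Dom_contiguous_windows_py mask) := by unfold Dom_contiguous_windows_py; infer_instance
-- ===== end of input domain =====

-- B replaces A's in-window flag state machine by a run-based scanner (jump run to run,
-- emit each True run directly); objective: alternative, same O(n) cost.

-- ===== PORT A =====
-- A's for-loop over (i, s) with state (windows, in_win, w_start), transliterated as
-- structural recursion over the same state (i carried as Int, w_start initialised 0 =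
-- Python's "unbound until first set"; it is never read before being set, as in A).
def pvALoop : List Bool → Int → List (Int × Int) → Bool → Int → (List (Int × Int) × Bool × Int)
  | [], _, windows, in_win, w_start => (windows, in_win, w_start)
  | s :: rest, i, windows, in_win, w_start =>
    if s && !in_win then pvALoop rest (i + 1) windows true i
    else if !s && in_win then pvALoop rest (i + 1) (windows ++ [(w_start, i - 1)]) false w_start
    else pvALoop rest (i + 1) windows in_win w_start

def contiguous_windows_py (mask : List Bool) : List (Int × Int) :=
  let st := pvALoop mask 0 [] false 0
  if st.2.1 then st.1 ++ [(st.2.2, (mask.length : Int) - 1)] else st.1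

-- ===== PORT B =====
-- Source B's inner `while j < n and mask[j] == mask[idx]` scan is the length of the leading
-- run of elements equal to the head (takeWhile), and `idx = j` continues on the rest
-- (dropWhile); the outer while becomes recursion on the remaining suffix.
def pvBGo (mask : List Bool) (idx : Int) : List (Int × Int) :=
  match mask with
  | [] => []
  | b :: t =>
    let L : Nat := 1 + (t.takeWhile (· == b)).length
    let rest := t.dropWhile (· == b)
    if b then (idx, idx + (L : Int) - 1) :: pvBGo rest (idx + (L : Int))
    else pvBGo rest (idx + (L : Int))
  termination_by mask.length
  decreasing_by
    all_goals
      simp only [List.length_cons]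
      exact Nat.lt_succ_of_le (List.length_dropWhile_le _ t)

def contiguous_windows_py_alt (mask : List Bool) : List (Int × Int) :=
  pvBGo mask 0

-- ===== PRECONDITION & SPEC =====
def Spec_contiguous_windows_py (mask : List Bool) (out : List (Int × Int)) : Prop := out = contiguous_windows_py_alt mask
instance (mask : List Bool) (out : List (Int × Int)) : Decidable (Spec_contiguous_windows_py mask out) := by unfold Spec_contiguous_windows_py; infer_instance

-- ===== CLAIM (what is proved, stated in full; the proofs are below) =====
def Claim_equal_contiguous_windows_py : Prop := ∀ (mask : List Bool), Dom_contiguous_windows_py mask → Spec_contiguous_windows_py mask (contiguous_windows_py mask)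

-- ===== LEMMAS AND PROOFS =====

-- Proof-only helper: A's loop followed by its final flush, with the final index written
-- relative to the current suffix (i + suffix.length - 1).
def pvAFin (mask : List Bool) (i : Int) (windows : List (Int × Int)) (in_win : Bool) (ws : Int) : List (Int × Int) :=
  let st := pvALoop mask i windows in_win ws
  if st.2.1 then st.1 ++ [(st.2.2, i + (mask.length : Int) - 1)] else st.1

-- Proof-only helper: B's continuation while inside a window that started at ws.
def pvGIn : List Bool → Int → Int → List (Int × Int)
  | [], i, ws => [(ws, i - 1)]
  | true :: t, i, ws => pvGIn t (i + 1) ws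
  | false :: t, i, ws => (ws, i - 1) :: pvBGo t (i + 1)

theorem pvBGo_false (t : List Bool) (i : Int) : pvBGo (false :: t) i = pvBGo t (i + 1) := by
  induction t generalizing i with
  | nil => simp [pvBGo]
  | cons b v ih =>
    cases b with
    | false =>
      rw [pvBGo, pvBGo]
      simp only [List.takeWhile, List.dropWhile, beq_self_eq_true, List.length_cons]
      push_cast; ring_nf
    | true =>
      rw [pvBGo]
      simp [List.takeWhile, List.dropWhile]

theorem pvGIn_char (t : List Bool) (i ws : Int) :
    pvGIn t i ws =
      (ws, i + ((t.takeWhile (· == true)).length : Int) - 1) ::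
        pvBGo (t.dropWhile (· == true)) (i + ((t.takeWhile (· == true)).length : Int)) := by
  induction t generalizing i with
  | nil => simp [pvGIn, pvBGo]
  | cons b v ih =>
    cases b with
    | true =>
      rw [pvGIn, ih]
      simp only [List.takeWhile, List.dropWhile, beq_self_eq_true, List.length_cons]
      push_cast; ring_nf
    | false =>
      rw [pvGIn]
      simp only [List.takeWhile, List.dropWhile]
      norm_num
      rw [pvBGo_false]

theorem pvBGo_true (t : List Bool) (i : Int) : pvBGo (true :: t) i = pvGIn t (i + 1) i := by
  rw [pvGIn_char, pvBGo]
  simp only [if_true]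
  push_cast; ring_nf

theorem pvMain (mask : List Bool) (i : Int) (windows : List (Int × Int)) (iw : Bool) (ws : Int) :
    pvAFin mask i windows iw ws =
      windows ++ (if iw then pvGIn mask i ws else pvBGo mask i) := by
  induction mask generalizing i windows iw ws with
  | nil =>
    cases iw <;> simp [pvAFin, pvALoop, pvGIn, pvBGo]
  | cons s t ih =>
    have hlen : i + ((t.length : Int) + 1) - 1 = i + 1 + (t.length : Int) - 1 := by ring
    cases s with
    | true =>
      cases iw with
      | false =>
        have : pvAFin (true :: t) i windows false ws = pvAFin t (i + 1) windows true i := by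
          simp [pvAFin, pvALoop, hlen]
        rw [this, ih, pvBGo_true]
        simp
      | true =>
        have : pvAFin (true :: t) i windows true ws = pvAFin t (i + 1) windows true ws := by
          simp [pvAFin, pvALoop, hlen]
        rw [this, ih]
        simp [pvGIn]
    | false =>
      cases iw with
      | false =>
        have : pvAFin (false :: t) i windows false ws = pvAFin t (i + 1) windows false ws := by
          simp [pvAFin, pvALoop, hlen]
        rw [this, ih, pvBGo_false]
        simp
      | true =>
        have : pvAFin (false :: t) i windows true ws =
            pvAFin t (i + 1) (windows ++ [(ws, i - 1)]) false ws := by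
          simp [pvAFin, pvALoop, hlen]
        rw [this, ih]
        simp [pvGIn]

-- ===== VERDICT (by name: the statement is the Claim_ definition above) =====
theorem contiguous_windows_py_spec : Claim_equal_contiguous_windows_py := by
  intro mask _
  unfold Spec_contiguous_windows_py contiguous_windows_py contiguous_windows_py_alt
  have h := pvMain mask 0 [] false 0
  simp only [pvAFin, if_neg, Bool.false_eq_true, not_false_iff, List.nil_append] at h
  simpa [pvAFin] using h
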